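-- pv_equiv track=rewrite | github.com/Blindy-Archive/BScript | bscript.py | find_end_curly_brackets
-- ===== SOURCE A (Python) =====
-- def find_end_curly_brackets(terminal_input):
--     for line in terminal_input[::-1]:
--
--         if line == "}":
--             return True
--         elif line == " ":
--             pass
--         elif line == "\n":
--             pass
--         else:
--             return False
-- ===== SOURCE B (Python) =====
-- def find_end_curly_brackets(terminal_input):
--     last = None
--     for line in terminal_input:
--         if line != " " and line != "\n":
--             last = line
--     if last is None:
--         return None
--     return last == "}"
-- ===== Notes on version B (the rewrite author's own statement) =====
-- stated objective: simpler
-- what changed: Replaces the reversed-copy early-exit scan with a forward single pass that keeps the last non-whitespace line and tests it once at the end.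
import Mathlib
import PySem

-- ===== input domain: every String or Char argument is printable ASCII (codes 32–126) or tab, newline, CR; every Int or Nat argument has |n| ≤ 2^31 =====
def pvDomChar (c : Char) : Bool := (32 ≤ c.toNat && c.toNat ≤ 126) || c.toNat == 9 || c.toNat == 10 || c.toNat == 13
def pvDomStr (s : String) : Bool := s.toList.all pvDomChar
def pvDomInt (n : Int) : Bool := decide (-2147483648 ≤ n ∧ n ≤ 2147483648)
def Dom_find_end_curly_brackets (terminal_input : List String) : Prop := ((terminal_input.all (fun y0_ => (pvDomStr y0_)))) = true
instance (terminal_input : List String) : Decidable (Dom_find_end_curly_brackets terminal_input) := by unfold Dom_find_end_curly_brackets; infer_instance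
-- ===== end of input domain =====

-- ===== PORT A =====
-- reversed early-exit scan: terminal_input[::-1], return on first decisive line
def pvALoop : List String → Option Bool
  | [] => none
  | line :: rest =>
    if line = "}" then some true
    else if line = " " then pvALoop rest
    else if line = "\n" then pvALoop rest
    else some false

def find_end_curly_brackets (terminal_input : List String) : Option Bool :=
  match PySem.List.slice? terminal_input none none (-1) with
  | some rev => pvALoop rev
  | none => none   -- unreachable: step = -1 ≠ 0

-- ===== PORT B =====
-- forward single pass keeping the last non-whitespace line, judged once at the end
def find_end_curly_brackets_alt (terminal_input : List String) : Option Bool :=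
  match terminal_input.foldl
      (fun last line => if line ≠ " " ∧ line ≠ "\n" then some line else last) none with
  | none => none
  | some l => some (l = "}")

-- ===== PRECONDITION & SPEC =====
def Spec_find_end_curly_brackets (terminal_input : List String) (out : Option Bool) : Prop := out = find_end_curly_brackets_alt terminal_input
instance (terminal_input : List String) (out : Option Bool) : Decidable (Spec_find_end_curly_brackets terminal_input out) := by unfold Spec_find_end_curly_brackets; infer_instance

-- ===== CLAIM (what is proved, stated in full; the proofs are below) =====
def Claim_equal_find_end_curly_brackets : Prop := ∀ (terminal_input : List String), Dom_find_end_curly_brackets terminal_input → Spec_find_end_curly_brackets terminal_input (find_end_curly_brackets terminal_input)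

-- ===== LEMMAS AND PROOFS =====

theorem pvMain (terminal_input : List String) :
    pvALoop terminal_input.reverse = find_end_curly_brackets_alt terminal_input := by
  induction terminal_input using List.reverseRecOn with
  | nil => simp [pvALoop, find_end_curly_brackets_alt]
  | append_singleton xs x ih =>
    simp only [List.reverse_append, List.reverse_singleton, List.singleton_append,
      find_end_curly_brackets_alt, List.foldl_append, List.foldl] at *
    by_cases h1 : x = "}"
    · simp [pvALoop, h1]
    · by_cases h2 : x = " "
      · simp [pvALoop, h2, ih]
      · by_cases h3 : x = "\n"
        · simp [pvALoop, h3, ih]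
        · simp [pvALoop, h1, h2, h3]

-- ===== VERDICT (by name: the statement is the Claim_ definition above) =====
theorem find_end_curly_brackets_spec : Claim_equal_find_end_curly_brackets := by
  intro ti _
  unfold Spec_find_end_curly_brackets find_end_curly_brackets
  rw [PySem.List.slice?_none_none_neg_one]
  exact pvMain ti
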